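-- pv_equiv track=rewrite | github.com/alexgerstl/coordinateconverter | ensurer.py | __index_of_first_illegal_char_number_only
-- ===== SOURCE A (Python) =====
-- white_list_1 = ['-', ' ', '.', ',']
--
-- white_list_2 = [' ', '.', ',']
--
-- def __index_of_first_illegal_char_number_only(string, list_number):
--     is_ok = True
--     if list_number == 1:
--         _list = white_list_1
--     else:
--         _list = white_list_2
--
--     for i in range(0, len(string)):
--         if string[i].isdigit():
--             # all good
--             continue
--         elif string[i].isalpha():
--             char_int = ord(string[i].lower())
--             if char_int < ord('a') or char_int > ord('z'):
--                 return i
--             return i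
--         else:
--             # no digit, no letter
--             in_white_list = False
--             if string[i] in _list:
--                 in_white_list = True
--                 continue
--             is_ok = in_white_list
--
--     if not is_ok:
--         return i
--     return -1
-- ===== SOURCE B (Python) =====
-- # B: directly return the index of the first illegal character (not a digit and not
-- # whitelisted), as the function's name describes; -1 if every character is legal.
-- white_list_1 = ['-', ' ', '.', ',']
--
-- white_list_2 = [' ', '.', ',']
--
-- def _whitelist(list_number):
--     return white_list_1 if list_number == 1 else white_list_2
--
-- def _illegal(ch, wl):
--     return not ch.isdigit() and ch not in wl
--
-- def __index_of_first_illegal_char_number_only(string, list_number):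
--     wl = _whitelist(list_number)
--     for i, ch in enumerate(string):
--         if _illegal(ch, wl):
--             return i
--     return -1
-- ===== Notes on version B (the rewrite author's own statement) =====
-- stated objective: simpler
-- what changed: B is a single direct scan returning the index of the first illegal (non-digit, non-whitelisted) character, replacing A's flag-carrying loop that early-returns only on letters and afterwards returns the leftover loop index len(string)-1 when the flag was cleared.
-- intended difference: On strings whose first illegal (non-digit, non-whitelisted) character is not a letter, A returns the index of the first letter if one exists, else the leftover loop index len(string)-1, while B returns the index of that first illegal character, which is what the function's name promises (e.g. on ('1_000', 2) A returns 4, B returns 1). — e.g. on __index_of_first_illegal_char_number_only("1_000", 2): A returns 4, B returns 1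
import Mathlib
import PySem

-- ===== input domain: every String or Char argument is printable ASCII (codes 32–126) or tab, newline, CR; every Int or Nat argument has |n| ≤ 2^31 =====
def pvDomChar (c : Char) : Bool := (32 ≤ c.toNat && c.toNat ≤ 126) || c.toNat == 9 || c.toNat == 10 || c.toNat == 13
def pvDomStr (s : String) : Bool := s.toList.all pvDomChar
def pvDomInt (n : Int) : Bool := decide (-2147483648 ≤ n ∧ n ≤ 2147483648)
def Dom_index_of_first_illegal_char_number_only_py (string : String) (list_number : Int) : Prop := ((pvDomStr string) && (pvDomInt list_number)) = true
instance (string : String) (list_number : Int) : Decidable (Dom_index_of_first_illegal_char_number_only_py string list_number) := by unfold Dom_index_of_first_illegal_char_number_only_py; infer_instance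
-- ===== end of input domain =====

-- B is a single direct scan returning the index of the first illegal character; A's
-- first-letter / len-1 results on the D_ inputs are documented as an intended difference.

-- ===== PORT A =====
def pvWl1 : List Char := ['-', ' ', '.', ',']
def pvWl2 : List Char := [' ', '.', ',']

-- transliteration of A's for-loop: state = remaining chars, current index i, is_ok flag;
-- n is len(string), so the final `return i` (i = n-1 after a full loop) is exact.
def pvALoop (lst : List Char) (n : Int) : List Char → Int → Bool → Int
  | [], _, is_ok => if !is_ok then n - 1 else -1
  | c :: rest, i, is_ok =>
    if PySem.Chars.isdigit c then
      pvALoop lst n rest (i + 1) is_ok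
    else if PySem.Chars.isalpha c then
      let char_int := (PySem.Chars.lowerChar c).toNat
      if char_int < 97 ∨ 122 < char_int then i else i
    else
      if lst.contains c then pvALoop lst n rest (i + 1) is_ok
      else pvALoop lst n rest (i + 1) false

def index_of_first_illegal_char_number_only_py (string : String) (list_number : Int) : Int :=
  let _list := if list_number == 1 then pvWl1 else pvWl2
  pvALoop _list (string.toList.length : Int) string.toList 0 true

-- ===== PORT B =====
def pvWl (list_number : Int) : List Char := if list_number == 1 then pvWl1 else pvWl2

def pvIll (wl : List Char) (ch : Char) : Bool := !(PySem.Chars.isdigit ch) && !(wl.contains ch)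

def pvBLoop (wl : List Char) : List (Int × Char) → Int
  | [] => -1
  | (i, ch) :: rest =>
    if pvIll wl ch then i else pvBLoop wl rest

def index_of_first_illegal_char_number_only_py_alt (string : String) (list_number : Int) : Int :=
  pvBLoop (pvWl list_number) (PySem.List.enumerate string.toList 0)

-- ===== PRECONDITION & SPEC =====

-- On strings whose first illegal (non-digit, non-whitelisted) character is not a letter, A
-- returns the index of the first letter (or the leftover loop index len(string)-1 when there is
-- no letter) while B returns the index of that first illegal character, which is what the
-- function's name promises.
def D_index_of_first_illegal_char_number_only_py (string : String) (list_number : Int) : Prop :=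
  let cs := string.toList
  let j := cs.findIdx fun c => !(PySem.Chars.isdigit c) &&
    !((if list_number == 1 then pvWl1 else pvWl2).contains c)
  j < cs.length ∧ ¬PySem.Chars.isalpha (cs.getD j 'a')
instance (string : String) (list_number : Int) : Decidable (D_index_of_first_illegal_char_number_only_py string list_number) := by unfold D_index_of_first_illegal_char_number_only_py; infer_instance

def Spec_index_of_first_illegal_char_number_only_py (string : String) (list_number : Int) (out : Int) : Prop := ¬ D_index_of_first_illegal_char_number_only_py string list_number → out = index_of_first_illegal_char_number_only_py_alt string list_number
instance (string : String) (list_number : Int) (out : Int) : Decidable (Spec_index_of_first_illegal_char_number_only_py string list_number out) := by unfold Spec_index_of_first_illegal_char_number_only_py; infer_instance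

def pvDiffWitness_index_of_first_illegal_char_number_only_py : String × Int := ("1_000", 2)
def pvDiffWitnessOut_index_of_first_illegal_char_number_only_py : Int × Int := (4, 1)

-- ===== CLAIM (what is proved, stated in full; the proofs are below) =====
def Claim_unchanged_index_of_first_illegal_char_number_only_py : Prop := ∀ (string : String) (list_number : Int), Dom_index_of_first_illegal_char_number_only_py string list_number → Spec_index_of_first_illegal_char_number_only_py string list_number (index_of_first_illegal_char_number_only_py string list_number)
def Claim_changed_index_of_first_illegal_char_number_only_py : Prop := Dom_index_of_first_illegal_char_number_only_py (pvDiffWitness_index_of_first_illegal_char_number_only_py.1) (pvDiffWitness_index_of_first_illegal_char_number_only_py.2) ∧ D_index_of_first_illegal_char_number_only_py (pvDiffWitness_index_of_first_illegal_char_number_only_py.1) (pvDiffWitness_index_of_first_illegal_char_number_only_py.2) ∧ index_of_first_illegal_char_number_only_py (pvDiffWitness_index_of_first_illegal_char_number_only_py.1) (pvDiffWitness_index_of_first_illegal_char_number_only_py.2) = pvDiffWitnessOut_index_of_first_illegal_char_number_only_py.1 ∧ index_of_first_illegal_char_number_only_py_alt (pvDiffWitness_index_of_first_illegal_char_number_only_py.1)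 (pvDiffWitness_index_of_first_illegal_char_number_only_py.2) = pvDiffWitnessOut_index_of_first_illegal_char_number_only_py.2 ∧ pvDiffWitnessOut_index_of_first_illegal_char_number_only_py.1 ≠ pvDiffWitnessOut_index_of_first_illegal_char_number_only_py.2

-- ===== LEMMAS AND PROOFS =====

theorem pv_alpha_not_digit (c : Char) (h : PySem.Chars.isalpha c = true) :
    PySem.Chars.isdigit c = false := by
  simp [PySem.Chars.isalpha, PySem.Chars.isupper, PySem.Chars.islower, Char.le_def,
    UInt32.le_iff_toNat_le] at h
  simp [PySem.Chars.isdigit, Char.le_def, UInt32.le_iff_toNat_le]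
  omega

theorem pv_alpha_ill (wl : List Char) (hwl : wl = pvWl1 ∨ wl = pvWl2) (c : Char)
    (h : PySem.Chars.isalpha c = true) : pvIll wl c = true := by
  have hd := pv_alpha_not_digit c h
  simp [PySem.Chars.isalpha, PySem.Chars.isupper, PySem.Chars.islower, Char.le_def,
    UInt32.le_iff_toNat_le] at h
  simp [pvIll, hd]
  rcases hwl with rfl | rfl
  · simp [pvWl1]
    refine ⟨?_, ?_, ?_, ?_⟩ <;> (rintro rfl; revert h; decide)
  · simp [pvWl2]
    refine ⟨?_, ?_, ?_⟩ <;> (rintro rfl; revert h; decide)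

theorem pvALoop_eq (lst : List Char) (n : Int) (cs : List Char) (i : Int) (ok : Bool) :
    pvALoop lst n cs i ok =
      match cs.findIdx? PySem.Chars.isalpha with
      | some k => i + k
      | none => if ok && cs.all (fun c => PySem.Chars.isdigit c || lst.contains c) then -1 else n - 1 := by
  induction cs generalizing i ok with
  | nil => cases ok <;> simp [pvALoop]
  | cons c rest ih =>
    rcases hrest : rest.findIdx? PySem.Chars.isalpha with _ | k
    all_goals by_cases hd : PySem.Chars.isdigit c = true
    · have ha : PySem.Chars.isalpha c = false := by
        by_contra hcon
        have := pv_alpha_not_digit c (by simpa using Bool.of_not_eq_false hcon)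
        simp_all
      rw [pvALoop, if_pos hd, ih]
      simp [List.findIdx?_cons, ha, hd, hrest]
    · by_cases ha : PySem.Chars.isalpha c = true
      · rw [pvALoop, if_neg hd, if_pos ha]
        simp [List.findIdx?_cons, ha]
      · replace ha : PySem.Chars.isalpha c = false := by simpa using ha
        by_cases hm : lst.contains c = true
        · rw [pvALoop, if_neg hd, if_neg (by simp [ha]), if_pos hm, ih]
          have hmem : c ∈ lst := by simpa using hm
          simp [List.findIdx?_cons, ha, hrest, hmem, Bool.eq_false_iff.mpr hd]
        · replace hm : lst.contains c = false := by simpa using hm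
          have hmem : c ∉ lst := by simpa using hm
          rw [pvALoop, if_neg hd, if_neg (by simp [ha]), if_neg (by simpa using hm), ih]
          simp [List.findIdx?_cons, ha, hrest, hmem, Bool.eq_false_iff.mpr hd]
    · have ha : PySem.Chars.isalpha c = false := by
        by_contra hcon
        have := pv_alpha_not_digit c (by simpa using Bool.of_not_eq_false hcon)
        simp_all
      rw [pvALoop, if_pos hd, ih]
      simp [List.findIdx?_cons, ha, hrest]
      ring
    · by_cases ha : PySem.Chars.isalpha c = true
      · rw [pvALoop, if_neg hd, if_pos ha]
        simp [List.findIdx?_cons, ha]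
      · replace ha : PySem.Chars.isalpha c = false := by simpa using ha
        by_cases hm : lst.contains c = true
        · rw [pvALoop, if_neg hd, if_neg (by simp [ha]), if_pos hm, ih]
          simp [List.findIdx?_cons, ha, hrest]
          ring
        · replace hm : lst.contains c = false := by simpa using hm
          rw [pvALoop, if_neg hd, if_neg (by simp [ha]), if_neg (by simpa using hm), ih]
          simp [List.findIdx?_cons, ha, hrest]
          ring

theorem pvBLoop_eq (wl : List Char) (cs : List Char) (i : Int) :
    pvBLoop wl (PySem.List.enumerate cs i) =
      match cs.findIdx? (pvIll wl) with
      | some k => i + k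
      | none => -1 := by
  induction cs generalizing i with
  | nil => simp [pvBLoop, PySem.List.enumerate_nil]
  | cons c rest ih =>
    rw [PySem.List.enumerate_cons, pvBLoop]
    rcases hrest : rest.findIdx? (pvIll wl) with _ | k
    all_goals by_cases h : pvIll wl c = true
    · rw [if_pos h]
      simp [List.findIdx?_cons, h]
    · have h' : pvIll wl c = false := by simpa using h
      rw [if_neg (by simp [h']), ih]
      simp [List.findIdx?_cons, h', hrest]
    · rw [if_pos h]
      simp [List.findIdx?_cons, h]
    · have h' : pvIll wl c = false := by simpa using h
      rw [if_neg (by simp [h']), ih]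
      simp [List.findIdx?_cons, h', hrest]
      ring

-- the two ports characterised over the char list
theorem pvA_char (s : String) (ln : Int) :
    index_of_first_illegal_char_number_only_py s ln =
      (match s.toList.findIdx? PySem.Chars.isalpha with
       | some k => (k : Int)
       | none => if s.toList.all (fun c => PySem.Chars.isdigit c ||
            (pvWl ln).contains c) then -1 else (s.toList.length : Int) - 1) := by
  rw [index_of_first_illegal_char_number_only_py, pvALoop_eq]
  cases s.toList.findIdx? PySem.Chars.isalpha <;> simp [pvWl]

theorem pvB_char (s : String) (ln : Int) :
    index_of_first_illegal_char_number_only_py_alt s ln =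
      (match s.toList.findIdx? (pvIll (pvWl ln)) with
       | some k => (k : Int)
       | none => -1) := by
  rw [index_of_first_illegal_char_number_only_py_alt, pvBLoop_eq]
  cases s.toList.findIdx? (pvIll (pvWl ln)) <;> simp

theorem pv_main (s : String) (ln : Int)
    (hD : ¬ D_index_of_first_illegal_char_number_only_py s ln) :
    index_of_first_illegal_char_number_only_py s ln =
      index_of_first_illegal_char_number_only_py_alt s ln := by
  have hwl12 : (pvWl ln) = pvWl1 ∨ (pvWl ln) = pvWl2 := by
    unfold pvWl; split <;> simp
  rw [pvA_char, pvB_char]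
  set wl := pvWl ln with hwl
  set cs := s.toList with hcs
  rcases hfi : cs.findIdx? (pvIll wl) with _ | j
  · -- no illegal char at all: no alpha either, and all chars legal
    have hnone := List.findIdx?_eq_none_iff.mp hfi
    have hA : cs.findIdx? PySem.Chars.isalpha = none := by
      rw [List.findIdx?_eq_none_iff]
      intro x hx
      by_contra h
      have := pv_alpha_ill wl hwl12 x (by simpa using Bool.of_not_eq_false h)
      simp [hnone x hx] at this
    have hall : cs.all (fun c => PySem.Chars.isdigit c || wl.contains c) = true := by
      rw [List.all_eq_true]
      intro x hx
      have := hnone x hx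
      simp [pvIll] at this
      simp only [Bool.or_eq_true]
      by_cases hdx : PySem.Chars.isdigit x = true
      · exact Or.inl hdx
      · exact Or.inr (by simpa using this (by simpa using hdx))
    simp only [hA]
    rw [if_pos hall]
  · obtain ⟨hj, hpj, hbefore⟩ := List.findIdx?_eq_some_iff_getElem.mp hfi
    have hidx : cs.findIdx (pvIll wl) = j := (List.findIdx?_eq_some_iff_findIdx_eq.mp hfi).2
    by_cases hal : PySem.Chars.isalpha cs[j] = true
    · -- first illegal char is a letter: A finds the same index
      have hA : cs.findIdx? PySem.Chars.isalpha = some j := by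
        rw [List.findIdx?_eq_some_iff_getElem]
        exact ⟨hj, hal, fun m hm h => hbefore m hm (pv_alpha_ill wl hwl12 _ h)⟩
      simp [hA]
    · -- first illegal char is not a letter: that input is inside D_, contradicting ¬D_
      have hlt : cs.findIdx (pvIll wl) < cs.length := by rw [hidx]; exact hj
      have hget : cs.getD (cs.findIdx (pvIll wl)) 'a' = cs[j] := by
        rw [hidx]; exact List.getD_eq_getElem _ _ hj
      refine absurd ⟨by exact hlt, ?_⟩ hD
      show ¬PySem.Chars.isalpha (cs.getD (cs.findIdx (pvIll wl)) 'a') = true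
      rw [hget]; simp [hal]

-- ===== VERDICT (by name: the statement is the Claim_ definition above) =====
theorem index_of_first_illegal_char_number_only_py_spec : Claim_unchanged_index_of_first_illegal_char_number_only_py := by
  intro s ln _ hD
  exact pv_main s ln hD

theorem index_of_first_illegal_char_number_only_py_changed : Claim_changed_index_of_first_illegal_char_number_only_py := by
  unfold Claim_changed_index_of_first_illegal_char_number_only_py; decide
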